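-- pv_equiv track=rewrite | github.com/iamnishantchandra/DSA-QA-Using-Python | 10X/Python/Array/Counting_Stars.py | countStar
-- ===== SOURCE A (Python) =====
-- def countStar(s,n):
--     d={}
--     l=[]
--     for i in range(n):
--         if s[i] in d:
--             d[s[i]]+=1
--             l.append(d[s[i]])
--         else:
--             d[s[i]]=0
--             l.append(d[s[i]])
--
--     return sum(l)
-- ===== SOURCE B (Python) =====
-- def countStar(s, n):
--     c = {}
--     for i in range(n):
--         ch = s[i]
--         c[ch] = c.get(ch, 0) + 1
--     return sum(v * (v - 1) // 2 for v in c.values())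
-- ===== Notes on version B (the rewrite author's own statement) =====
-- stated objective: simpler
-- what changed: Replaces A's dict-plus-appended-list of running occurrence indices (then summed) by a single counting pass and the closed form sum v*(v-1)//2 over the counts.
import Mathlib
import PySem

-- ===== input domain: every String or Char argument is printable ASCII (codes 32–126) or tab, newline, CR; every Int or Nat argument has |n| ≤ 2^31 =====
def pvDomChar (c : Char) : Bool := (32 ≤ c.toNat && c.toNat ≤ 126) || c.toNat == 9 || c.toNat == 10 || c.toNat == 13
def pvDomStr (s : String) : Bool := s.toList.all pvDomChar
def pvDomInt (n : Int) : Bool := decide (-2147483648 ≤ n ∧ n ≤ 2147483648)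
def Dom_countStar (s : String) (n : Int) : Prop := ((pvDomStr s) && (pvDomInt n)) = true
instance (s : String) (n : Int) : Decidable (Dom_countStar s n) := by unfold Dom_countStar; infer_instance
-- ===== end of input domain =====

-- B replaces A's dict-plus-appended-list of running occurrence indices by one counting
-- pass and the closed form sum v*(v-1)//2 over the counts (objective: simpler).

-- ===== PORT A =====
def countStar (s : String) (n : Int) : Int :=
  let st := (PySem.List.pyRange 0 n 1).foldl
    (fun (st : PySem.Dict Char Int × List Int) j =>
      let c := PySem.List.pyGetD s.toList j ' '
      if st.1.contains c then
        let d := st.1.modify c 0 (· + 1)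
        (d, st.2 ++ [d.getD c 0])
      else
        let d := st.1.insert c 0
        (d, st.2 ++ [d.getD c 0]))
    (PySem.Dict.empty, [])
  st.2.sum

-- ===== PORT B =====
def countStar_alt (s : String) (n : Int) : Int :=
  let c := (PySem.List.pyRange 0 n 1).foldl
    (fun (d : PySem.Dict Char Int) j =>
      let ch := PySem.List.pyGetD s.toList j ' '
      d.insert ch (d.getD ch 0 + 1))
    PySem.Dict.empty
  (c.values.map (fun v => PySem.Int.floordiv (v * (v - 1)) 2)).sum

-- ===== PRECONDITION & SPEC =====
-- Pre_ excludes exactly the inputs where A raises IndexError: n exceeding the length of s.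
def Pre_countStar (s : String) (n : Int) : Prop := n ≤ (s.toList.length : Int)
instance (s : String) (n : Int) : Decidable (Pre_countStar s n) := by unfold Pre_countStar; infer_instance
def pvWitness_countStar : String × Int := ("abca", 4)

def Spec_countStar (s : String) (n : Int) (out : Int) : Prop := out = countStar_alt s n
instance (s : String) (n : Int) (out : Int) : Decidable (Spec_countStar s n out) := by unfold Spec_countStar; infer_instance

-- ===== CLAIM (what is proved, stated in full; the proofs are below) =====
def Claim_equal_countStar : Prop := ∀ (s : String) (n : Int), Dom_countStar s n → Pre_countStar s n → Spec_countStar s n (countStar s n)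

-- ===== LEMMAS AND PROOFS =====

theorem pvFoldlRangeTake {α β : Type} (xs : List β) (d : β) (f : α → β → α) (init : α)
    (n : Int) (h : n ≤ (xs.length : Int)) :
    (PySem.List.pyRange 0 n 1).foldl (fun acc j => f acc (PySem.List.pyGetD xs j d)) init
      = (xs.take n.toNat).foldl f init := by
  rcases (by omega : n ≤ 0 ∨ 0 < n) with hn | hn
  · rw [PySem.List.pyRange_one_eq_nil (by omega)]
    have : n.toNat = 0 := by omega
    simp [this]
  · set ys := xs.take n.toNat with hys
    have hlen : (ys.length : Int) = n := by
      simp [hys, List.length_take]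
      omega
    have := PySem.List.foldl_pyRange_zero_pyGetD (xs := ys) (d := d) (f := f) (init := init)
    simp only [PySem.List.len_eq] at this
    rw [hlen] at this
    rw [← this]
    apply PySem.List.foldl_congr_mem
    intro acc j hj
    rw [PySem.List.mem_pyRange_one] at hj
    congr 1
    rw [PySem.List.pyGetD_eq_getElem (xs := xs) (i := j) (d := d) hj.1 (by omega),
        PySem.List.pyGetD_eq_getElem (xs := ys) (i := j) (d := d) hj.1 (by omega)]
    simp [hys]

def pvC2 (v : Int) : Int := PySem.Int.floordiv (v * (v - 1)) 2

theorem pvC2_natCast (k : Nat) : pvC2 (k : Int) = (k.choose 2 : Int) := by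
  cases k with
  | zero => decide
  | succ m =>
    unfold pvC2
    have h1 : ((m + 1 : Nat) : Int) * (((m + 1 : Nat) : Int) - 1) = (((m + 1) * m : Nat) : Int) := by
      push_cast; ring
    have h2 : PySem.Int.floordiv ((((m+1)*m : Nat)) : Int) 2 = (((m+1)*m/2 : Nat) : Int) := by
      exact_mod_cast PySem.Int.floordiv_natCast ((m+1)*m) 2
    rw [h1, h2]
    congr 1
    rw [Nat.choose_two_right]
    cases m with
    | zero => rfl
    | succ p => rw [Nat.succ_sub_one]

theorem pvC2_succ (k : Nat) : pvC2 ((k : Int) + 1) = pvC2 (k : Int) + (k : Int) := by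
  have : ((k : Int) + 1) = ((k + 1 : Nat) : Int) := by push_cast; ring
  rw [this, pvC2_natCast, pvC2_natCast]
  rw [Nat.choose_succ_succ, Nat.choose_one_right]
  push_cast; ring

theorem pvSumIte {α : Type} [DecidableEq α] (l : List α) (c : α) (hl : l.Nodup) (hc : c ∈ l) (a : Int) :
    (l.map (fun k => if k = c then a else 0)).sum = a := by
  induction l with
  | nil => cases hc
  | cons x xs ih =>
    simp only [List.map_cons, List.sum_cons]
    rcases List.mem_cons.mp hc with h | h
    · subst h
      rw [if_pos rfl, List.sum_eq_zero]
      · ring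
      · intro y hy
        rcases List.mem_map.mp hy with ⟨k, hk, rfl⟩
        have hk' : k ≠ c := fun e => (List.nodup_cons.mp hl).1 (e ▸ hk)
        simp [hk']
    · have hx : x ≠ c := fun e => (List.nodup_cons.mp hl).1 (e ▸ h)
      rw [if_neg hx, ih (List.nodup_cons.mp hl).2 h]
      ring

def pvStepA (st : PySem.Dict Char Int × List Int) (c : Char) : PySem.Dict Char Int × List Int :=
  if st.1.contains c then
    let d := st.1.modify c 0 (· + 1)
    (d, st.2 ++ [d.getD c 0])
  else
    let d := st.1.insert c 0
    (d, st.2 ++ [d.getD c 0])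

theorem pvCountAppendNe (t : List Char) (c k : Char) (hkc : k ≠ c) :
    (t ++ [c]).count k = t.count k := by
  have h0 : List.count k [c] = 0 := List.count_eq_zero.mpr (by simp [hkc])
  rw [List.count_append, h0]
  omega

theorem pvCountAppendSelf (t : List Char) (c : Char) :
    (t ++ [c]).count c = t.count c + 1 := by
  simp [List.count_append]

theorem pvMemOfAppend (t : List Char) (c k : Char) (hk : k ∈ t ++ [c]) (hkc : k ≠ c) : k ∈ t := by
  rcases List.mem_append.mp hk with h | h
  · exact h
  · simp at h; exact absurd h hkc

theorem pvMain (t : List Char) :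
    (∀ c, ((t.foldl pvStepA (PySem.Dict.empty, ([] : List Int))).1.contains c) = decide (c ∈ t)) ∧
    (∀ c, c ∈ t → (t.foldl pvStepA (PySem.Dict.empty, [])).1.getD c 0 = (t.count c : Int) - 1) ∧
    (t.foldl pvStepA (PySem.Dict.empty, [])).2.sum
      = ((PySem.Set.ofList t).map (fun k => pvC2 ((t.count k : Int)))).sum := by
  induction t using List.reverseRecOn with
  | nil =>
    refine ⟨?_, ?_, ?_⟩ <;> simp [PySem.Dict.contains_empty, PySem.Set.ofList_nil]
  | append_singleton t c ih =>
    obtain ⟨ih1, ih2, ih3⟩ := ih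
    rw [List.foldl_append]
    set p := t.foldl pvStepA (PySem.Dict.empty, ([] : List Int)) with hp
    by_cases hc : c ∈ t
    · have hcont : p.1.contains c = true := by rw [ih1]; simp [hc]
      have hstep : List.foldl pvStepA p [c] =
          (p.1.modify c 0 (· + 1), p.2 ++ [(p.1.modify c 0 (· + 1)).getD c 0]) := by
        simp [pvStepA, hcont]
      rw [hstep]
      have hval : (p.1.modify c 0 (· + 1)).getD c 0 = (t.count c : Int) := by
        rw [PySem.Dict.getD_modify_self, ih2 c hc]; ring
      refine ⟨?_, ?_, ?_⟩
      · intro k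
        rw [PySem.Dict.contains_modify, ih1]
        by_cases hk : k = c <;> simp [hk, hc]
      · intro k hk
        rw [PySem.Dict.getD_modify]
        by_cases hkc : k = c
        · subst hkc
          rw [if_pos rfl, ih2 k hc, pvCountAppendSelf]
          push_cast; ring
        · rw [if_neg hkc, ih2 k (pvMemOfAppend t c k hk hkc), pvCountAppendNe t c k hkc]
      · rw [List.sum_append, hval, List.sum_singleton, ih3]
        have hof : PySem.Set.ofList (t ++ [c]) = PySem.Set.ofList t := by
          rw [PySem.Set.ofList_append_singleton,
              PySem.Set.add_of_mem ((PySem.Set.mem_ofList t c).mpr hc)]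
        rw [hof]
        have hterm : ∀ k ∈ PySem.Set.ofList t,
            pvC2 (((t ++ [c]).count k : Int)) =
              pvC2 ((t.count k : Int)) + (if k = c then (t.count c : Int) else 0) := by
          intro k hk
          by_cases hkc : k = c
          · subst hkc
            rw [pvCountAppendSelf, if_pos rfl]
            push_cast
            exact pvC2_succ (t.count k)
          · rw [pvCountAppendNe t c k hkc, if_neg hkc]; ring
        rw [List.map_congr_left hterm,
            PySem.List.sum_map_add_int (f := fun k => pvC2 ((t.count k : Int)))
              (g := fun k => if k = c then (t.count c : Int) else 0),
            pvSumIte (PySem.Set.ofList t) c (PySem.Set.nodup_ofList t) ((PySem.Set.mem_ofList t c).mpr hc)]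
    · have hcont : p.1.contains c = false := by rw [ih1]; simp [hc]
      have hstep : List.foldl pvStepA p [c] =
          (p.1.insert c 0, p.2 ++ [(p.1.insert c 0).getD c 0]) := by
        simp [pvStepA, hcont]
      rw [hstep]
      have hval : (p.1.insert c 0).getD c 0 = 0 := PySem.Dict.getD_insert_self _ _ _ _
      refine ⟨?_, ?_, ?_⟩
      · intro k
        rw [PySem.Dict.contains_insert, ih1]
        by_cases hk : k = c <;> simp [hk]
      · intro k hk
        rw [PySem.Dict.getD_insert]
        by_cases hkc : k = c
        · subst hkc
          rw [if_pos rfl, pvCountAppendSelf]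
          have : t.count k = 0 := List.count_eq_zero.mpr hc
          rw [this]; ring
        · rw [if_neg hkc, ih2 k (pvMemOfAppend t c k hk hkc), pvCountAppendNe t c k hkc]
      · rw [List.sum_append, hval, List.sum_singleton, ih3]
        have hof : PySem.Set.ofList (t ++ [c]) = PySem.Set.ofList t ++ [c] := by
          rw [PySem.Set.ofList_append_singleton,
              PySem.Set.add_of_not_mem (fun h => hc ((PySem.Set.mem_ofList t c).mp h))]
        rw [hof, List.map_append, List.sum_append]
        have hterm : ∀ k ∈ PySem.Set.ofList t,
            pvC2 (((t ++ [c]).count k : Int)) = pvC2 ((t.count k : Int)) := by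
          intro k hk
          have hkc : k ≠ c := fun e => hc (e ▸ (PySem.Set.mem_ofList t k).mp hk)
          rw [pvCountAppendNe t c k hkc]
        rw [List.map_congr_left hterm]
        have h1 : pvC2 (((t ++ [c]).count c : Int)) = 0 := by
          rw [pvCountAppendSelf, List.count_eq_zero.mpr hc]; decide
        rw [List.map_singleton, List.sum_singleton, h1, add_zero]

-- ===== VERDICT (by name: the statement is the Claim_ definition above) =====
theorem countStar_spec : Claim_equal_countStar := by
  intro s n _dom pre
  unfold Spec_countStar
  have pre' : n ≤ (s.toList.length : Int) := pre
  have hA : countStar s n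
      = ((s.toList.take n.toNat).foldl pvStepA (PySem.Dict.empty, ([] : List Int))).2.sum := by
    show ((PySem.List.pyRange 0 n 1).foldl
        (fun acc j => pvStepA acc (PySem.List.pyGetD s.toList j ' '))
        (PySem.Dict.empty, ([] : List Int))).2.sum = _
    rw [pvFoldlRangeTake s.toList ' ' pvStepA (PySem.Dict.empty, ([] : List Int)) n pre']
  have hB : countStar_alt s n
      = (((PySem.Dict.counter (s.toList.take n.toNat)).values).map
          (fun v => PySem.Int.floordiv (v * (v - 1)) 2)).sum := by
    show (((PySem.List.pyRange 0 n 1).foldl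
        (fun (d : PySem.Dict Char Int) j =>
          (fun (d : PySem.Dict Char Int) ch => d.insert ch (d.getD ch 0 + 1)) d
            (PySem.List.pyGetD s.toList j ' '))
        PySem.Dict.empty).values.map (fun v => PySem.Int.floordiv (v * (v - 1)) 2)).sum = _
    rw [pvFoldlRangeTake s.toList ' '
        (fun (d : PySem.Dict Char Int) ch => d.insert ch (d.getD ch 0 + 1))
        PySem.Dict.empty n pre',
      PySem.Dict.foldl_insert_getD_add_one_eq_counter]
  rw [hA, hB, (pvMain (s.toList.take n.toNat)).2.2]
  have hv : (PySem.Dict.counter (s.toList.take n.toNat)).values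
      = (PySem.Set.ofList (s.toList.take n.toNat)).map
          (fun k => ((s.toList.take n.toNat).count k : Int)) := by
    show (PySem.Dict.counter (s.toList.take n.toNat)).items.map (·.2) = _
    rw [PySem.Dict.items_counter]
    simp [List.map_map]
  rw [hv, List.map_map]
  rfl
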